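-- pv_equiv track=rewrite | github.com/yamengxi/GLBW | NeuralCleanse/ImageNet100.py | get_trigger_size_from_model_path
-- ===== SOURCE A (Python) =====
-- def get_trigger_size_from_model_path(model_path):
--     str_list = model_path.split('x')
--     trigger_size = None
--     for now_str in str_list:
--         if len(now_str) > 0 and '0' <= now_str[0] and now_str[0] <= '9':
--             if trigger_size is None:
--                 if len(now_str) > 1 and '0' <= now_str[1] and now_str[1] <= '9':
--                     trigger_size = int(now_str[:2])
--                 else:
--                     trigger_size = int(now_str[:1])
--             else:
--                 raise ValueError(f'Can not get trigger size from model path: {model_path}')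
--
--     if trigger_size is None:
--         raise ValueError(f'Can not get trigger size from model path: {model_path}')
--
--     return trigger_size
-- ===== SOURCE B (Python) =====
-- def get_trigger_size_from_model_path(model_path):
--     # single left-to-right character scan: a digit counts iff it is at the string
--     # start or just after an 'x'; a second digit right after extends it to two digits
--     sizes = []
--     boundary = True
--     i = 0
--     n = len(model_path)
--     while i < n:
--         c = model_path[i]
--         if boundary and '0' <= c <= '9':
--             v = ord(c) - 48
--             if i + 1 < n and '0' <= model_path[i + 1] <= '9':
--                 v = v * 10 + (ord(model_path[i + 1]) - 48)
--             sizes.append(v)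
--         boundary = c == 'x'
--         i += 1
--     if len(sizes) != 1:
--         raise ValueError(f'Can not get trigger size from model path: {model_path}')
--     return sizes[0]
-- ===== Notes on version B (the rewrite author's own statement) =====
-- stated objective: alternative
-- what changed: Replaces split('x') plus a per-token first/second-char parse with a single character scan that tracks a token-boundary flag and collects digit values arithmetically, raising unless exactly one boundary digit run is found.
import Mathlib
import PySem

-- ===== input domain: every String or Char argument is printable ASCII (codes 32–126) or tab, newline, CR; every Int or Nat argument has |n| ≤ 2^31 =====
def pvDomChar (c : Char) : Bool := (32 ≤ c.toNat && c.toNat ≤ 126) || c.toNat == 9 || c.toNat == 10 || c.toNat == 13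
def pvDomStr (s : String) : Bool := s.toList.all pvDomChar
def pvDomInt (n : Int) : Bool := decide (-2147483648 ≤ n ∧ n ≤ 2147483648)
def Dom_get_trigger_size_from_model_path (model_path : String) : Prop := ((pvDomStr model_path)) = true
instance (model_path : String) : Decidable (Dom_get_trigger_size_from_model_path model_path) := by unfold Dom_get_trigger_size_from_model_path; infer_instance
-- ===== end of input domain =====

-- B replaces A's split('x') + per-token parse by a single character scan with a boundary flag (alternative decomposition, same cost).
-- Equivalence is about the RETURN value on Pre_ (exactly one 'x'-separated token starting with a digit); elsewhere both Pythons raise ValueError.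

-- shared tiny helper: '0' <= c <= '9'
def digitB (c : Char) : Bool := decide ('0' ≤ c) && decide (c ≤ '9')

-- ===== PORT A =====
-- loop over str_list carrying trigger_size : Option Int; outer none = ValueError raised
def aLoop : List (List Char) → Option Int → Option (Option Int)
  | [], ts => some ts
  | now :: rest, ts =>
    match now with
    | [] => aLoop rest ts                      -- len(now_str) > 0 fails
    | c0 :: tail =>
      if digitB c0 then
        match ts with
        | none =>
          let t : Int :=
            match tail with
            | c1 :: _ =>
              if digitB c1 then (PySem.Int.ofChars? (PySem.List.slice (c0 :: tail) none (some 2))).getD 0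
              else (PySem.Int.ofChars? (PySem.List.slice (c0 :: tail) none (some 1))).getD 0
            | [] => (PySem.Int.ofChars? (PySem.List.slice (c0 :: tail) none (some 1))).getD 0
          aLoop rest (some t)
        | some _ => none                       -- raise ValueError
      else aLoop rest ts

def get_trigger_size_from_model_path (model_path : String) : Int :=
  match aLoop (PySem.Chars.splitOn model_path.toList ['x']) none with
  | some (some t) => t
  | _ => 0                                     -- ValueError paths (excluded by Pre_)

-- ===== PORT B =====
-- one char scan; boundary = "previous char was 'x' (or start)"; sizes accumulates parsed values
def bLoop : List Char → Bool → List Int → List Int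
  | [], _, sizes => sizes
  | c :: rest, boundary, sizes =>
    bLoop rest (c == 'x')
      (if boundary && digitB c then
        sizes ++ [match rest with
          | c2 :: _ =>
            if digitB c2 then ((c.toNat : Int) - 48) * 10 + ((c2.toNat : Int) - 48)
            else (c.toNat : Int) - 48
          | [] => (c.toNat : Int) - 48]
      else sizes)

def get_trigger_size_from_model_path_alt (model_path : String) : Int :=
  match bLoop model_path.toList true [] with
  | [v] => v
  | _ => 0                                     -- ValueError (excluded by Pre_)

-- ===== PRECONDITION & SPEC =====
def digitHeadTok (tok : List Char) : Bool :=
  match tok with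
  | [] => false
  | c :: _ => digitB c

-- Pre_: exactly one 'x'-separated component of the path starts with an ASCII digit;
-- on every other input both Pythons raise ValueError (A returns nothing there).
def Pre_get_trigger_size_from_model_path (model_path : String) : Prop :=
  (PySem.Chars.splitOn model_path.toList ['x']).countP digitHeadTok = 1
instance (model_path : String) : Decidable (Pre_get_trigger_size_from_model_path model_path) := by unfold Pre_get_trigger_size_from_model_path; infer_instance

def pvWitness_get_trigger_size_from_model_path : String := "ImageNet100_3x3.pth"

def Spec_get_trigger_size_from_model_path (model_path : String) (out : Int) : Prop := out = get_trigger_size_from_model_path_alt model_path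
instance (model_path : String) (out : Int) : Decidable (Spec_get_trigger_size_from_model_path model_path out) := by unfold Spec_get_trigger_size_from_model_path; infer_instance

-- ===== CLAIM (what is proved, stated in full; the proofs are below) =====
def Claim_equal_get_trigger_size_from_model_path : Prop := ∀ (model_path : String), Dom_get_trigger_size_from_model_path model_path → Pre_get_trigger_size_from_model_path model_path → Spec_get_trigger_size_from_model_path model_path (get_trigger_size_from_model_path model_path)

-- ===== LEMMAS AND PROOFS =====

-- enumeration of ASCII digit chars
lemma char_digit_cases (c : Char) (h : digitB c = true) :
    c ∈ ['0','1','2','3','4','5','6','7','8','9'] := by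
  have h' := h
  simp only [digitB, Bool.and_eq_true, decide_eq_true_eq] at h'
  obtain ⟨h1, h2⟩ := h'
  have hv1 : 48 ≤ c.toNat := by
    rw [Char.le_def, UInt32.le_iff_toNat_le] at h1; exact h1
  have hv2 : c.toNat ≤ 57 := by
    rw [Char.le_def, UInt32.le_iff_toNat_le] at h2; exact h2
  have key : ∀ (d : Char), c.toNat = d.toNat → c = d := by
    intro d h; exact Char.ext (UInt32.toNat_inj.mp h)
  interval_cases h : c.toNat <;>
    [ simp [key '0' (by decide)]; simp [key '1' (by decide)]; simp [key '2' (by decide)];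
      simp [key '3' (by decide)]; simp [key '4' (by decide)]; simp [key '5' (by decide)];
      simp [key '6' (by decide)]; simp [key '7' (by decide)]; simp [key '8' (by decide)];
      simp [key '9' (by decide)] ]

lemma ofChars?_one_digit (c : Char) (h : digitB c = true) :
    PySem.Int.ofChars? [c] = some ((c.toNat : Int) - 48) := by
  have := char_digit_cases c h
  fin_cases this <;> decide

lemma ofChars?_two_digit (c d : Char) (hc : digitB c = true) (hd : digitB d = true) :
    PySem.Int.ofChars? [c, d] = some (((c.toNat : Int) - 48) * 10 + ((d.toNat : Int) - 48)) := by
  have h1 := char_digit_cases c hc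
  have h2 := char_digit_cases d hd
  fin_cases h1 <;> fin_cases h2 <;> decide

-- reference single-char split: mySplit l = l.split('x') as lists of chars
def mySplit : List Char → List (List Char)
  | [] => [[]]
  | c :: rest =>
    if c = 'x' then [] :: mySplit rest
    else
      match mySplit rest with
      | t :: ts => (c :: t) :: ts
      | [] => [[c]]

lemma mySplit_ne_nil (l : List Char) : mySplit l ≠ [] := by
  cases l with
  | nil => simp [mySplit]
  | cons c rest =>
    simp only [mySplit]
    split
    · simp
    · split <;> simp

lemma go_spec (l : List Char) : ∀ (fuel : Nat) (cur : List Char) (acc : List (List Char)),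
    l.length < fuel →
    PySem.Chars.splitOn.go ['x'] fuel l cur acc =
      acc.reverse ++ (match mySplit l with
        | t :: ts => (cur.reverse ++ t) :: ts
        | [] => []) := by
  induction l with
  | nil =>
    intro fuel cur acc h
    match fuel with
    | f + 1 => simp [PySem.Chars.splitOn.go, mySplit]
  | cons c rest ih =>
    intro fuel cur acc h
    match fuel with
    | f + 1 =>
      by_cases hc : c = 'x'
      · subst hc
        have hpre : ['x'].isPrefixOf ('x' :: rest) = true := by simp [List.isPrefixOf]
        rw [show PySem.Chars.splitOn.go ['x'] (f+1) ('x' :: rest) cur acc =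
              PySem.Chars.splitOn.go ['x'] f rest [] (cur.reverse :: acc) by
            simp [PySem.Chars.splitOn.go, hpre]]
        rw [ih f [] (cur.reverse :: acc) (by simpa using Nat.lt_of_succ_lt_succ h)]
        obtain ⟨t, ts, hts⟩ := List.exists_cons_of_ne_nil (mySplit_ne_nil rest)
        simp [mySplit, hts]
      · have hpre : ['x'].isPrefixOf (c :: rest) = false := by
          simp [List.isPrefixOf]; intro hcx; exact hc hcx.symm
        rw [show PySem.Chars.splitOn.go ['x'] (f+1) (c :: rest) cur acc =
              PySem.Chars.splitOn.go ['x'] f rest (c :: cur) acc by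
            simp [PySem.Chars.splitOn.go, hpre]]
        rw [ih f (c :: cur) acc (by simpa using Nat.lt_of_succ_lt_succ h)]
        obtain ⟨t, ts, hts⟩ := List.exists_cons_of_ne_nil (mySplit_ne_nil rest)
        simp [mySplit, hc, hts]

lemma splitOn_eq_mySplit (l : List Char) :
    PySem.Chars.splitOn l ['x'] = mySplit l := by
  rw [PySem.Chars.splitOn, go_spec l (l.length + 1) [] [] (by omega)]
  obtain ⟨t, ts, hts⟩ := List.exists_cons_of_ne_nil (mySplit_ne_nil l)
  simp [hts]

-- what A parses from a digit-headed token
def parseA : List Char → Int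
  | [] => 0
  | c0 :: tail =>
    match tail with
    | c1 :: _ =>
      if digitB c1 then (PySem.Int.ofChars? (PySem.List.slice (c0 :: tail) none (some 2))).getD 0
      else (PySem.Int.ofChars? (PySem.List.slice (c0 :: tail) none (some 1))).getD 0
    | [] => (PySem.Int.ofChars? (PySem.List.slice (c0 :: tail) none (some 1))).getD 0

-- what B computes from a digit-headed token
def parseB : List Char → Int
  | [] => 0
  | c :: tail =>
    match tail with
    | d :: _ =>
      if digitB d then ((c.toNat : Int) - 48) * 10 + ((d.toNat : Int) - 48)
      else (c.toNat : Int) - 48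
    | [] => (c.toNat : Int) - 48

lemma parseA_eq_parseB (tok : List Char) (h : digitHeadTok tok = true) :
    parseA tok = parseB tok := by
  match tok with
  | [] => simp [digitHeadTok] at h
  | c :: tail =>
    have hc : digitB c = true := by simpa [digitHeadTok] using h
    match tail with
    | [] =>
      have h1 : PySem.List.slice [c] none (some (1 : Int)) = [c] := by
        rw [PySem.List.slice_to _ (by omega)]; simp
      simp [parseA, parseB, h1, ofChars?_one_digit c hc]
    | d :: rest =>
      by_cases hd : digitB d = true
      · have h2 : PySem.List.slice (c :: d :: rest) none (some (2 : Int)) = [c, d] := by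
          rw [PySem.List.slice_to _ (by omega)]; simp [List.take]
        simp [parseA, parseB, hd, h2, ofChars?_two_digit c d hc hd]
      · have h1 : PySem.List.slice (c :: d :: rest) none (some (1 : Int)) = [c] := by
          rw [PySem.List.slice_to _ (by omega)]; simp [List.take]
        simp [parseA, parseB, hd, h1, ofChars?_one_digit c hc]

-- A-side characterisation
lemma aLoop_some (toks : List (List Char)) (v : Int) :
    aLoop toks (some v) = if toks.countP digitHeadTok = 0 then some (some v) else none := by
  induction toks with
  | nil => simp [aLoop]
  | cons tok rest ih =>
    match tok with
    | [] => simpa [aLoop, digitHeadTok, List.countP_cons] using ih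
    | c0 :: tail =>
      by_cases hc : digitB c0 = true
      · simp [aLoop, hc, digitHeadTok]
      · simpa [aLoop, hc, digitHeadTok, List.countP_cons] using ih

lemma aLoop_none (toks : List (List Char)) :
    aLoop toks none =
      match toks.filter digitHeadTok with
      | [] => some none
      | [t] => some (some (parseA t))
      | _ :: _ :: _ => none := by
  induction toks with
  | nil => simp [aLoop]
  | cons tok rest ih =>
    match tok with
    | [] =>
      have : digitHeadTok ([] : List Char) = false := by simp [digitHeadTok]
      simpa [aLoop, List.filter_cons, this] using ih
    | c0 :: tail =>
      by_cases hc : digitB c0 = true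
      · have hdh : digitHeadTok (c0 :: tail) = true := by simpa [digitHeadTok] using hc
        rw [show aLoop ((c0 :: tail) :: rest) none = aLoop rest (some (parseA (c0 :: tail))) by
              simp [aLoop, hc, parseA]]
        rw [aLoop_some]
        rw [List.filter_cons, if_pos hdh]
        rcases hrest : rest.filter digitHeadTok with _ | ⟨t, ts⟩
        · have : rest.countP digitHeadTok = 0 := by
            rw [List.countP_eq_length_filter, hrest]; rfl
          simp [this]
        · have : rest.countP digitHeadTok ≠ 0 := by
            rw [List.countP_eq_length_filter, hrest]; simp
          simp [this]
      · have hdh : digitHeadTok (c0 :: tail) = false := by simpa [digitHeadTok] using hc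
        simpa [aLoop, hc, List.filter_cons, hdh] using ih

-- B-side characterisation
def vals (toks : List (List Char)) : List Int := (toks.filter digitHeadTok).map parseB

lemma bLoop_spec (l : List Char) : ∀ (sizes : List Int),
    bLoop l true sizes = sizes ++ vals (mySplit l) ∧
    bLoop l false sizes = sizes ++ vals ((mySplit l).drop 1) := by
  induction l with
  | nil => intro sizes; simp [bLoop, mySplit, vals, digitHeadTok]
  | cons c rest ih =>
    intro sizes
    by_cases hc : c = 'x'
    · subst hc
      have hd : digitB 'x' = false := by decide
      constructor
      · rw [show bLoop ('x' :: rest) true sizes = bLoop rest true sizes by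
              simp [bLoop, hd]]
        rw [(ih sizes).1]
        simp [mySplit, vals, digitHeadTok]
      · rw [show bLoop ('x' :: rest) false sizes = bLoop rest true sizes by
              simp [bLoop, hd]]
        rw [(ih sizes).1]
        simp [mySplit, vals]
    · obtain ⟨t, ts, hts⟩ := List.exists_cons_of_ne_nil (mySplit_ne_nil rest)
      have hsplit : mySplit (c :: rest) = (c :: t) :: ts := by
        simp [mySplit, hc, hts]
      have hx : (c == 'x') = false := by simp [hc]
      constructor
      · by_cases hdc : digitB c = true
        · rcases rest with _ | ⟨d, r2⟩
          · have h1 : t = [] ∧ ts = [] := by have := hts; simp [mySplit] at this; exact this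
            rw [show bLoop [c] true sizes = sizes ++ [(c.toNat : Int) - 48] by
                  simp [bLoop, hdc]]
            simp [hsplit, h1.1, h1.2, vals, digitHeadTok, hdc, parseB]
          · rw [show bLoop (c :: d :: r2) true sizes =
                  bLoop (d :: r2) false
                    (sizes ++ [if digitB d then ((c.toNat : Int) - 48) * 10 + ((d.toNat : Int) - 48)
                               else (c.toNat : Int) - 48]) by
                simp [bLoop, hdc, hx]]
            rw [(ih _).2]
            by_cases hdx : d = 'x'
            · subst hdx
              have h1 : t = [] ∧ mySplit r2 = ts := by
                have := hts; simp [mySplit] at this; exact this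
              have hdB : digitB 'x' = false := by decide
              have hm : mySplit ('x' :: r2) = [] :: mySplit r2 := by simp [mySplit]
              rw [hsplit, hm]
              rw [← h1.2] at hsplit ⊢
              simp [h1.1, vals, digitHeadTok, hdc, parseB, hdB]
            · obtain ⟨t', ts', hts'⟩ := List.exists_cons_of_ne_nil (mySplit_ne_nil r2)
              have h1 : d :: t' = t ∧ ts' = ts := by
                have := hts; simp [mySplit, hdx, hts'] at this; exact this
              have hm : mySplit (d :: r2) = (d :: t') :: ts' := by simp [mySplit, hdx, hts']
              rw [hsplit, hm]
              rw [← h1.1, ← h1.2]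
              by_cases hdd : digitB d = true <;>
                simp [vals, digitHeadTok, hdc, parseB, hdd]
        · rw [show bLoop (c :: rest) true sizes = bLoop rest false sizes by
              simp [bLoop, hdc, hx]]
          rw [(ih sizes).2]
          have hhead : digitHeadTok (c :: t) = false := by simpa [digitHeadTok] using hdc
          simp [hsplit, hts, vals, hhead]
      · rw [show bLoop (c :: rest) false sizes = bLoop rest false sizes by
              simp [bLoop, hx]]
        rw [(ih sizes).2]
        simp [hsplit, hts, vals]

-- ===== VERDICT (by name: the statement is the Claim_ definition above) =====
theorem get_trigger_size_from_model_path_spec : Claim_equal_get_trigger_size_from_model_path := by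
  intro s _ hpre
  unfold Spec_get_trigger_size_from_model_path
  unfold Pre_get_trigger_size_from_model_path at hpre
  rw [splitOn_eq_mySplit] at hpre
  rw [List.countP_eq_length_filter] at hpre
  obtain ⟨t, hts⟩ := List.length_eq_one_iff.mp hpre
  have hmem : t ∈ (mySplit s.toList).filter digitHeadTok := by simp [hts]
  have hhead : digitHeadTok t = true := (List.mem_filter.mp hmem).2
  have hA : get_trigger_size_from_model_path s = parseA t := by
    unfold get_trigger_size_from_model_path
    rw [splitOn_eq_mySplit, aLoop_none, hts]
  have hB : get_trigger_size_from_model_path_alt s = parseB t := by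
    unfold get_trigger_size_from_model_path_alt
    rw [(bLoop_spec s.toList []).1]
    simp [vals, hts]
  rw [hA, hB, parseA_eq_parseB t hhead]
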